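-- pv_equiv track=rewrite | github.com/Cheetar/Scrimish | scrimish.py | prepare_top_deck
-- ===== SOURCE A (Python) =====
-- def prepare_top_deck(top_deck):
--     top_deck = [7 if x == "A" else x for x in top_deck]
--     top_deck = [8 if x == "S" else x for x in top_deck]
--     top_deck = [9 if x == "C" else x for x in top_deck]
--     top_deck = [10 if x == "N" else x for x in top_deck]
--     top_deck = [0 if x == "E" else x for x in top_deck]
--     top_deck = [int(x) for x in top_deck]
--     return top_deck
-- ===== SOURCE B (Python) =====
-- def prepare_top_deck(top_deck):
--     mapping = {"A": 7, "S": 8, "C": 9, "N": 10, "E": 0}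
--     return [mapping[x] if x in mapping else int(x) for x in top_deck]
-- ===== Notes on version B (the rewrite author's own statement) =====
-- stated objective: simpler
-- what changed: One table-driven pass with a letter->value dict replaces six sequential list-comprehension passes (five conditional substitutions plus a final int() pass).
import Mathlib
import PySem

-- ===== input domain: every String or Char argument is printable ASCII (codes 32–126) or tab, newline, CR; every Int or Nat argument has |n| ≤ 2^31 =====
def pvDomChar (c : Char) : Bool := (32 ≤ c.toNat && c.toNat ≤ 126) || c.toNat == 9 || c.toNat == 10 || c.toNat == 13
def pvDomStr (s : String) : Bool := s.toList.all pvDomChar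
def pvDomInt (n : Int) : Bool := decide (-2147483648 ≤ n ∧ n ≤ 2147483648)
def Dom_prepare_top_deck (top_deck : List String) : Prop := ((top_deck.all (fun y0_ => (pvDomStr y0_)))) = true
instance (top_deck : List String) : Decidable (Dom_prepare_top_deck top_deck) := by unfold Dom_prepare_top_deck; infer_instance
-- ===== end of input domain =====

-- B replaces A's six sequential comprehension passes by one table-driven pass (objective: simpler).

-- ===== PORT A =====
-- A's intermediate lists mix ints (already-replaced letters) and strings; modelled as Int ⊕ String.
-- int(x) on an int is the identity (inl case); on a string it is PySem.Int.ofStr? (exact), total under Pre_.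
def prepare_top_deck (top_deck : List String) : List Int :=
  let d0 : List (Sum Int String) := top_deck.map (fun x => if x = "A" then Sum.inl 7 else Sum.inr x)
  let d1 := d0.map (fun y => match y with | Sum.inr x => if x = "S" then Sum.inl 8 else Sum.inr x | z => z)
  let d2 := d1.map (fun y => match y with | Sum.inr x => if x = "C" then Sum.inl 9 else Sum.inr x | z => z)
  let d3 := d2.map (fun y => match y with | Sum.inr x => if x = "N" then Sum.inl 10 else Sum.inr x | z => z)
  let d4 := d3.map (fun y => match y with | Sum.inr x => if x = "E" then Sum.inl 0 else Sum.inr x | z => z)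
  d4.map (fun y => match y with | Sum.inl n => n | Sum.inr x => (PySem.Int.ofStr? x).getD 0)

-- ===== PORT B =====
def pvMapping : PySem.Dict String Int :=
  PySem.Dict.ofList [("A", 7), ("S", 8), ("C", 9), ("N", 10), ("E", 0)]

def prepare_top_deck_alt (top_deck : List String) : List Int :=
  top_deck.map (fun x =>
    match pvMapping.get? x with
    | some v => v
    | none => (PySem.Int.ofStr? x).getD 0)

-- ===== PRECONDITION & SPEC =====
-- Pre_ excludes exactly the inputs where A raises ValueError: an element that is neither one
-- of the five card letters nor an int()-parseable string.
def Pre_prepare_top_deck (top_deck : List String) : Prop :=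
  ∀ x ∈ top_deck, x = "A" ∨ x = "S" ∨ x = "C" ∨ x = "N" ∨ x = "E" ∨ (PySem.Int.ofStr? x).isSome
instance (top_deck : List String) : Decidable (Pre_prepare_top_deck top_deck) := by
  unfold Pre_prepare_top_deck; infer_instance
def pvWitness_prepare_top_deck : List String := ["A", "S", "C", "N", "E", " 7 ", "-12"]

def Spec_prepare_top_deck (top_deck : List String) (out : List Int) : Prop := out = prepare_top_deck_alt top_deck
instance (top_deck : List String) (out : List Int) : Decidable (Spec_prepare_top_deck top_deck out) := by unfold Spec_prepare_top_deck; infer_instance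

-- ===== CLAIM (what is proved, stated in full; the proofs are below) =====
def Claim_equal_prepare_top_deck : Prop := ∀ (top_deck : List String), Dom_prepare_top_deck top_deck → Pre_prepare_top_deck top_deck → Spec_prepare_top_deck top_deck (prepare_top_deck top_deck)

-- ===== LEMMAS AND PROOFS =====

-- pointwise agreement of the two per-element transformations
theorem pv_elem_eq (x : String) :
    (match (match (match (match (match (if x = "A" then Sum.inl 7 else Sum.inr x : Sum Int String) with
        | Sum.inr y => if y = "S" then Sum.inl 8 else Sum.inr y | z => z) with
        | Sum.inr y => if y = "C" then Sum.inl 9 else Sum.inr y | z => z) with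
        | Sum.inr y => if y = "N" then Sum.inl 10 else Sum.inr y | z => z) with
        | Sum.inr y => if y = "E" then Sum.inl 0 else Sum.inr y | z => z) with
      | Sum.inl n => n | Sum.inr y => (PySem.Int.ofStr? y).getD 0)
    = (match pvMapping.get? x with
       | some v => v
       | none => (PySem.Int.ofStr? x).getD 0) := by
  have hitems : pvMapping.items = [("A", 7), ("S", 8), ("C", 9), ("N", 10), ("E", 0)] := by decide
  by_cases hA : x = "A"; · subst hA; decide
  by_cases hS : x = "S"; · subst hS; decide
  by_cases hC : x = "C"; · subst hC; decide
  by_cases hN : x = "N"; · subst hN; decide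
  by_cases hE : x = "E"; · subst hE; decide
  have bA : ("A" == x) = false := by simpa using Ne.symm hA
  have bS : ("S" == x) = false := by simpa using Ne.symm hS
  have bC : ("C" == x) = false := by simpa using Ne.symm hC
  have bN : ("N" == x) = false := by simpa using Ne.symm hN
  have bE : ("E" == x) = false := by simpa using Ne.symm hE
  simp [PySem.Dict.get?, hitems, List.find?, bA, bS, bC, bN, bE, hA, hS, hC, hN, hE]

-- ===== VERDICT (by name: the statement is the Claim_ definition above) =====
theorem prepare_top_deck_spec : Claim_equal_prepare_top_deck := by
  intro top_deck _ _
  unfold Spec_prepare_top_deck prepare_top_deck prepare_top_deck_alt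
  simp only [List.map_map]
  apply List.map_congr_left
  intro x _
  exact pv_elem_eq x
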